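-- pv_equiv track=rewrite | github.com/mightystoosh/advent2020 | day5.py | traverse_row
-- ===== SOURCE A (Python) =====
-- def traverse_row(data, row, col, final_row=None, final_col=None):
--     #print (data, row, col)
--     if not data:
--         return final_row[0], final_col[0]
--     elif data[0] == "F":
--         final_row = [row[0], int((row[1] +row[0]) / 2)]
--         return traverse_row(data[1:], final_row, col, final_row, col)
--     elif data[0] == "B":
--         final_row = [int((row[1] + row[0]) / 2) + 1, row[1]]
--         return traverse_row(data[1:], final_row, col, final_row, col)
--
--     elif data[0] == "L":
--         final_col = [col[0], int((col[1] +col[0]) / 2)]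
--         return traverse_row(data[1:], row,  final_col, row, final_col)
--     elif data[0] == "R":
--         final_col = [int((col[1] + col[0]) / 2) + 1, col[1]]
--         return traverse_row(data[1:], row, final_col, row, final_col)
-- ===== SOURCE B (Python) =====
-- def traverse_row(data, row, col, final_row=None, final_col=None):
--     if not data:
--         return final_row[0], final_col[0]
--     r = None  # current (lo, hi) row interval, initialised lazily from `row`
--     c = None  # current (lo, hi) col interval, initialised lazily from `col`
--     for ch in data:
--         if ch == "F" or ch == "B":
--             lo, hi = r if r is not None else (row[0], row[1])
--             m = int((lo + hi) / 2)
--             r = (lo, m) if ch == "F" else (m + 1, hi)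
--         elif ch == "L" or ch == "R":
--             lo, hi = c if c is not None else (col[0], col[1])
--             m = int((lo + hi) / 2)
--             c = (lo, m) if ch == "L" else (m + 1, hi)
--         else:
--             return None  # invalid direction character
--     return (r[0] if r is not None else row[0]), (c[0] if c is not None else col[0])
-- ===== Notes on version B (the rewrite author's own statement) =====
-- stated objective: alternative
-- what changed: Replaced A's recursion that slices the string and rebuilds two-element lists (and threads final_row/final_col copies) at every step with a single iterative pass over the characters maintaining two integer interval pairs.
-- outside the precondition, e.g. on traverse_row('F', [], [0, 1], None, None): A raises IndexError, B raises IndexError; on traverse_row('', [0], [0], None, None): A raises TypeError, B raises TypeError; on traverse_row('X', [0, 1], [0, 1], None, None): A returns None, B returns None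
import Mathlib
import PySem

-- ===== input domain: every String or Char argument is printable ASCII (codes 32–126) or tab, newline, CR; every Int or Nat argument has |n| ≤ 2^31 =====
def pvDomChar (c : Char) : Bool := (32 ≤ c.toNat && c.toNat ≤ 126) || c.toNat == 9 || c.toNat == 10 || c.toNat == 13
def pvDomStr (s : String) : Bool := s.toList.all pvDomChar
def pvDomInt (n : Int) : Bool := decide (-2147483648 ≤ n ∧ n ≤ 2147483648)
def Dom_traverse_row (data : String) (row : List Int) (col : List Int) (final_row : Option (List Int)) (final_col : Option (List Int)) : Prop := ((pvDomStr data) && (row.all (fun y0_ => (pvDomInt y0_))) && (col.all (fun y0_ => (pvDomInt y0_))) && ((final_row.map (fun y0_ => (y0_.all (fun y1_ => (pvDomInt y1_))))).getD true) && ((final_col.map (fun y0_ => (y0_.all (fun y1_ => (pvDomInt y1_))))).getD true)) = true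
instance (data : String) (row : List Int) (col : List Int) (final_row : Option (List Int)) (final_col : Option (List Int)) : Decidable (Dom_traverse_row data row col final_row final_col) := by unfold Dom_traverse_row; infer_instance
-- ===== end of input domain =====

-- B replaces A's string-slicing recursion (which rebuilds 2-element lists each step) by one
-- iterative pass over the characters keeping two integer interval pairs (objective: alternative).


-- ===== PORT A =====
-- Python's int((x + y) / 2): exact float division then truncation toward zero; on Dom
-- (|entries| ≤ 2^31, so |sum| ≤ 2^32 < 2^53 is float-exact) this is exactly Int.tdiv.
-- Where Python would raise (list index out of range, final_row None) the port uses the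
-- default 0 via pyGet?/getD; those inputs are excluded by Pre_traverse_row.
def traverse_row_go : List Char → List Int → List Int → Option (List Int) → Option (List Int) → Int × Int
  | [], _, _, fr, fc =>
      ((PySem.List.pyGet? (fr.getD []) (0 : Int)).getD 0, (PySem.List.pyGet? (fc.getD []) (0 : Int)).getD 0)
  | c :: rest, row, col, _, _ =>
      if c = 'F' then
        let f : List Int := [(PySem.List.pyGet? row (0 : Int)).getD 0,
          ((PySem.List.pyGet? row (1 : Int)).getD 0 + (PySem.List.pyGet? row (0 : Int)).getD 0).tdiv 2]
        traverse_row_go rest f col (some f) (some col)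
      else if c = 'B' then
        let f : List Int := [((PySem.List.pyGet? row (1 : Int)).getD 0 + (PySem.List.pyGet? row (0 : Int)).getD 0).tdiv 2 + 1,
          (PySem.List.pyGet? row (1 : Int)).getD 0]
        traverse_row_go rest f col (some f) (some col)
      else if c = 'L' then
        let f : List Int := [(PySem.List.pyGet? col (0 : Int)).getD 0,
          ((PySem.List.pyGet? col (1 : Int)).getD 0 + (PySem.List.pyGet? col (0 : Int)).getD 0).tdiv 2]
        traverse_row_go rest row f (some row) (some f)
      else if c = 'R' then
        let f : List Int := [((PySem.List.pyGet? col (1 : Int)).getD 0 + (PySem.List.pyGet? col (0 : Int)).getD 0).tdiv 2 + 1,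
          (PySem.List.pyGet? col (1 : Int)).getD 0]
        traverse_row_go rest row f (some row) (some f)
      else (0, 0)  -- Python falls off the elif chain and returns None; excluded by Pre_

def traverse_row (data : String) (row : List Int) (col : List Int) (final_row : Option (List Int)) (final_col : Option (List Int)) : Int × Int :=
  traverse_row_go data.toList row col final_row final_col

-- ===== PORT B =====
-- B's loop as a structural recursion over the characters; state = (row interval, col interval),
-- each lazily initialised from `row`/`col` (Python's row[0]/row[1] via pyGet?, default 0 where
-- Python would raise IndexError; excluded by Pre_). `none` result = B's `return None` on an
-- invalid direction character (excluded by Pre_; the wrapper returns (0, 0) there).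
def traverse_row_alt_go : List Char → Option (Int × Int) → Option (Int × Int) → List Int → List Int → Option (Option (Int × Int) × Option (Int × Int))
  | [], r, c, _, _ => some (r, c)
  | ch :: rest, r, c, row, col =>
    if ch = 'F' ∨ ch = 'B' then
      let p := r.getD ((PySem.List.pyGet? row (0 : Int)).getD 0, (PySem.List.pyGet? row (1 : Int)).getD 0)
      let m := (p.1 + p.2).tdiv 2
      traverse_row_alt_go rest (if ch = 'F' then some (p.1, m) else some (m + 1, p.2)) c row col
    else if ch = 'L' ∨ ch = 'R' then
      let p := c.getD ((PySem.List.pyGet? col (0 : Int)).getD 0, (PySem.List.pyGet? col (1 : Int)).getD 0)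
      let m := (p.1 + p.2).tdiv 2
      traverse_row_alt_go rest r (if ch = 'L' then some (p.1, m) else some (m + 1, p.2)) row col
    else none

def traverse_row_alt (data : String) (row : List Int) (col : List Int) (final_row : Option (List Int)) (final_col : Option (List Int)) : Int × Int :=
  match data.toList with
  | [] => ((PySem.List.pyGet? (final_row.getD []) (0 : Int)).getD 0, (PySem.List.pyGet? (final_col.getD []) (0 : Int)).getD 0)
  | l =>
      match traverse_row_alt_go l none none row col with
      | none => (0, 0)
      | some st =>
          ((st.1.map Prod.fst).getD ((PySem.List.pyGet? row (0 : Int)).getD 0),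
           (st.2.map Prod.fst).getD ((PySem.List.pyGet? col (0 : Int)).getD 0))

-- ===== PRECONDITION & SPEC =====
-- Pre_ excludes exactly the inputs where Python A does not return an (int, int) pair:
-- strings with a character outside "FBLR" (A falls through its elif chain and returns None),
-- and too-short row/col/final_row/final_col arguments on which A raises IndexError/TypeError.
def Pre_traverse_row (data : String) (row : List Int) (col : List Int) (final_row : Option (List Int)) (final_col : Option (List Int)) : Prop :=
  data.toList.all (fun c => c == 'F' || c == 'B' || c == 'L' || c == 'R') = true ∧
  (data.toList.isEmpty = true → final_row ≠ none ∧ final_row.getD [] ≠ [] ∧ final_col ≠ none ∧ final_col.getD [] ≠ []) ∧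
  (data.toList.any (fun c => c == 'F' || c == 'B') = true → 2 ≤ row.length) ∧
  (data.toList.isEmpty = false → data.toList.any (fun c => c == 'F' || c == 'B') = false → row ≠ []) ∧
  (data.toList.any (fun c => c == 'L' || c == 'R') = true → 2 ≤ col.length) ∧
  (data.toList.isEmpty = false → data.toList.any (fun c => c == 'L' || c == 'R') = false → col ≠ [])
instance (data : String) (row : List Int) (col : List Int) (final_row : Option (List Int)) (final_col : Option (List Int)) : Decidable (Pre_traverse_row data row col final_row final_col) := by
  unfold Pre_traverse_row; infer_instance

def pvWitness_traverse_row : String × List Int × List Int × Option (List Int) × Option (List Int) :=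
  ("FBLR", [0, 127], [0, 7], none, none)

def Spec_traverse_row (data : String) (row : List Int) (col : List Int) (final_row : Option (List Int)) (final_col : Option (List Int)) (out : Int × Int) : Prop := out = traverse_row_alt data row col final_row final_col
instance (data : String) (row : List Int) (col : List Int) (final_row : Option (List Int)) (final_col : Option (List Int)) (out : Int × Int) : Decidable (Spec_traverse_row data row col final_row final_col out) := by unfold Spec_traverse_row; infer_instance

-- ===== CLAIM (what is proved, stated in full; the proofs are below) =====
def Claim_equal_traverse_row : Prop := ∀ (data : String) (row : List Int) (col : List Int) (final_row : Option (List Int)) (final_col : Option (List Int)), Dom_traverse_row data row col final_row final_col → Pre_traverse_row data row col final_row final_col → Spec_traverse_row data row col final_row final_col (traverse_row data row col final_row final_col)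

-- ===== LEMMAS AND PROOFS =====

-- relation between A's current interval list and B's lazily initialised state component
def pvRel (r₀ r : List Int) (s : Option (Int × Int)) : Prop :=
  (s = none ∧ r = r₀) ∨ ∃ lo hi, s = some (lo, hi) ∧ r = [lo, hi]

theorem pvGet2_0 (a b : Int) : (PySem.List.pyGet? [a, b] (0 : Int)).getD 0 = a := rfl
theorem pvGet2_1 (a b : Int) : (PySem.List.pyGet? [a, b] (1 : Int)).getD 0 = b := rfl

theorem go_F (rest : List Char) (row col : List Int) (fr fc : Option (List Int)) :
    traverse_row_go ('F' :: rest) row col fr fc =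
    traverse_row_go rest
      [(PySem.List.pyGet? row (0 : Int)).getD 0,
        ((PySem.List.pyGet? row (1 : Int)).getD 0 + (PySem.List.pyGet? row (0 : Int)).getD 0).tdiv 2]
      col
      (some [(PySem.List.pyGet? row (0 : Int)).getD 0,
        ((PySem.List.pyGet? row (1 : Int)).getD 0 + (PySem.List.pyGet? row (0 : Int)).getD 0).tdiv 2])
      (some col) := rfl

theorem go_B (rest : List Char) (row col : List Int) (fr fc : Option (List Int)) :
    traverse_row_go ('B' :: rest) row col fr fc =
    traverse_row_go rest
      [((PySem.List.pyGet? row (1 : Int)).getD 0 + (PySem.List.pyGet? row (0 : Int)).getD 0).tdiv 2 + 1,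
        (PySem.List.pyGet? row (1 : Int)).getD 0]
      col
      (some [((PySem.List.pyGet? row (1 : Int)).getD 0 + (PySem.List.pyGet? row (0 : Int)).getD 0).tdiv 2 + 1,
        (PySem.List.pyGet? row (1 : Int)).getD 0])
      (some col) := rfl

theorem go_L (rest : List Char) (row col : List Int) (fr fc : Option (List Int)) :
    traverse_row_go ('L' :: rest) row col fr fc =
    traverse_row_go rest row
      [(PySem.List.pyGet? col (0 : Int)).getD 0,
        ((PySem.List.pyGet? col (1 : Int)).getD 0 + (PySem.List.pyGet? col (0 : Int)).getD 0).tdiv 2]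
      (some row)
      (some [(PySem.List.pyGet? col (0 : Int)).getD 0,
        ((PySem.List.pyGet? col (1 : Int)).getD 0 + (PySem.List.pyGet? col (0 : Int)).getD 0).tdiv 2]) := rfl

theorem go_R (rest : List Char) (row col : List Int) (fr fc : Option (List Int)) :
    traverse_row_go ('R' :: rest) row col fr fc =
    traverse_row_go rest row
      [((PySem.List.pyGet? col (1 : Int)).getD 0 + (PySem.List.pyGet? col (0 : Int)).getD 0).tdiv 2 + 1,
        (PySem.List.pyGet? col (1 : Int)).getD 0]
      (some row)
      (some [((PySem.List.pyGet? col (1 : Int)).getD 0 + (PySem.List.pyGet? col (0 : Int)).getD 0).tdiv 2 + 1,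
        (PySem.List.pyGet? col (1 : Int)).getD 0]) := rfl

theorem altgo_F_none (rest : List Char) (s2 : Option (Int × Int)) (row col : List Int) :
    traverse_row_alt_go ('F' :: rest) none s2 row col =
    traverse_row_alt_go rest
      (some ((PySem.List.pyGet? row (0 : Int)).getD 0,
        ((PySem.List.pyGet? row (0 : Int)).getD 0 + (PySem.List.pyGet? row (1 : Int)).getD 0).tdiv 2))
      s2 row col := rfl

theorem altgo_F_some (rest : List Char) (lo hi : Int) (s2 : Option (Int × Int)) (row col : List Int) :
    traverse_row_alt_go ('F' :: rest) (some (lo, hi)) s2 row col =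
    traverse_row_alt_go rest (some (lo, (lo + hi).tdiv 2)) s2 row col := rfl

theorem altgo_B_none (rest : List Char) (s2 : Option (Int × Int)) (row col : List Int) :
    traverse_row_alt_go ('B' :: rest) none s2 row col =
    traverse_row_alt_go rest
      (some (((PySem.List.pyGet? row (0 : Int)).getD 0 + (PySem.List.pyGet? row (1 : Int)).getD 0).tdiv 2 + 1,
        (PySem.List.pyGet? row (1 : Int)).getD 0))
      s2 row col := rfl

theorem altgo_B_some (rest : List Char) (lo hi : Int) (s2 : Option (Int × Int)) (row col : List Int) :
    traverse_row_alt_go ('B' :: rest) (some (lo, hi)) s2 row col =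
    traverse_row_alt_go rest (some ((lo + hi).tdiv 2 + 1, hi)) s2 row col := rfl

theorem altgo_L_none (rest : List Char) (s1 : Option (Int × Int)) (row col : List Int) :
    traverse_row_alt_go ('L' :: rest) s1 none row col =
    traverse_row_alt_go rest s1
      (some ((PySem.List.pyGet? col (0 : Int)).getD 0,
        ((PySem.List.pyGet? col (0 : Int)).getD 0 + (PySem.List.pyGet? col (1 : Int)).getD 0).tdiv 2))
      row col := rfl

theorem altgo_L_some (rest : List Char) (lo hi : Int) (s1 : Option (Int × Int)) (row col : List Int) :
    traverse_row_alt_go ('L' :: rest) s1 (some (lo, hi)) row col =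
    traverse_row_alt_go rest s1 (some (lo, (lo + hi).tdiv 2)) row col := rfl

theorem altgo_R_none (rest : List Char) (s1 : Option (Int × Int)) (row col : List Int) :
    traverse_row_alt_go ('R' :: rest) s1 none row col =
    traverse_row_alt_go rest s1
      (some (((PySem.List.pyGet? col (0 : Int)).getD 0 + (PySem.List.pyGet? col (1 : Int)).getD 0).tdiv 2 + 1,
        (PySem.List.pyGet? col (1 : Int)).getD 0))
      row col := rfl

theorem altgo_R_some (rest : List Char) (lo hi : Int) (s1 : Option (Int × Int)) (row col : List Int) :
    traverse_row_alt_go ('R' :: rest) s1 (some (lo, hi)) row col =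
    traverse_row_alt_go rest s1 (some ((lo + hi).tdiv 2 + 1, hi)) row col := rfl

theorem pv_main (l : List Char) (row₀ col₀ : List Int) :
    (∀ c ∈ l, c = 'F' ∨ c = 'B' ∨ c = 'L' ∨ c = 'R') →
    ∀ (row col : List Int) (s1 s2 : Option (Int × Int)),
    pvRel row₀ row s1 → pvRel col₀ col s2 →
    traverse_row_go l row col (some row) (some col)
      = (match traverse_row_alt_go l s1 s2 row₀ col₀ with
         | none => (0, 0)
         | some st =>
            ((st.1.map Prod.fst).getD ((PySem.List.pyGet? row₀ (0 : Int)).getD 0),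
             (st.2.map Prod.fst).getD ((PySem.List.pyGet? col₀ (0 : Int)).getD 0))) := by
  induction l with
  | nil =>
      intro _ row col s1 s2 h1 h2
      rcases h1 with ⟨hs, hr⟩ | ⟨lo, hi, hs, hr⟩ <;>
        rcases h2 with ⟨hs2, hc⟩ | ⟨lo2, hi2, hs2, hc⟩ <;>
        subst hs <;> subst hs2 <;> subst hr <;> subst hc <;>
        simp [traverse_row_go, traverse_row_alt_go]
  | cons c rest ih =>
      intro hval row col s1 s2 h1 h2
      have hc := hval c (by simp)
      have hrest : ∀ x ∈ rest, x = 'F' ∨ x = 'B' ∨ x = 'L' ∨ x = 'R' := fun x hx => hval x (by simp [hx])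
      rcases hc with hc | hc | hc | hc <;> subst hc
      · rcases h1 with ⟨hs, hr⟩ | ⟨lo, hi, hs, hr⟩ <;> subst hs <;> subst hr
        · rw [go_F, altgo_F_none,
            Int.add_comm ((PySem.List.pyGet? row (0 : Int)).getD 0) ((PySem.List.pyGet? row (1 : Int)).getD 0)]
          exact ih hrest _ _ _ _ (Or.inr ⟨_, _, rfl, rfl⟩) h2
        · rw [go_F, altgo_F_some, Int.add_comm lo hi,
            pvGet2_0, pvGet2_1]
          exact ih hrest _ _ _ _ (Or.inr ⟨_, _, rfl, rfl⟩) h2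
      · rcases h1 with ⟨hs, hr⟩ | ⟨lo, hi, hs, hr⟩ <;> subst hs <;> subst hr
        · rw [go_B, altgo_B_none,
            Int.add_comm ((PySem.List.pyGet? row (0 : Int)).getD 0) ((PySem.List.pyGet? row (1 : Int)).getD 0)]
          exact ih hrest _ _ _ _ (Or.inr ⟨_, _, rfl, rfl⟩) h2
        · rw [go_B, altgo_B_some, Int.add_comm lo hi,
            pvGet2_0, pvGet2_1]
          exact ih hrest _ _ _ _ (Or.inr ⟨_, _, rfl, rfl⟩) h2
      · rcases h2 with ⟨hs, hr⟩ | ⟨lo, hi, hs, hr⟩ <;> subst hs <;> subst hr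
        · rw [go_L, altgo_L_none,
            Int.add_comm ((PySem.List.pyGet? col (0 : Int)).getD 0) ((PySem.List.pyGet? col (1 : Int)).getD 0)]
          exact ih hrest _ _ _ _ h1 (Or.inr ⟨_, _, rfl, rfl⟩)
        · rw [go_L, altgo_L_some, Int.add_comm lo hi,
            pvGet2_0, pvGet2_1]
          exact ih hrest _ _ _ _ h1 (Or.inr ⟨_, _, rfl, rfl⟩)
      · rcases h2 with ⟨hs, hr⟩ | ⟨lo, hi, hs, hr⟩ <;> subst hs <;> subst hr
        · rw [go_R, altgo_R_none,
            Int.add_comm ((PySem.List.pyGet? col (0 : Int)).getD 0) ((PySem.List.pyGet? col (1 : Int)).getD 0)]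
          exact ih hrest _ _ _ _ h1 (Or.inr ⟨_, _, rfl, rfl⟩)
        · rw [go_R, altgo_R_some, Int.add_comm lo hi,
            pvGet2_0, pvGet2_1]
          exact ih hrest _ _ _ _ h1 (Or.inr ⟨_, _, rfl, rfl⟩)

-- ===== VERDICT (by name: the statement is the Claim_ definition above) =====
theorem traverse_row_spec : Claim_equal_traverse_row := by
  intro data row col fr fc _ hpre
  unfold Spec_traverse_row traverse_row traverse_row_alt
  rcases hl : data.toList with _ | ⟨c, rest⟩
  · simp [traverse_row_go]
  · have hall := hpre.1
    rw [hl] at hall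
    simp only [List.all_eq_true, Bool.or_eq_true, beq_iff_eq] at hall
    have hval : ∀ x ∈ c :: rest, x = 'F' ∨ x = 'B' ∨ x = 'L' ∨ x = 'R' := fun x hx => by
      have := hall x hx; tauto
    have h := pv_main (c :: rest) row col hval row col none none (Or.inl ⟨rfl, rfl⟩) (Or.inl ⟨rfl, rfl⟩)
    have hgo : traverse_row_go (c :: rest) row col fr fc
        = traverse_row_go (c :: rest) row col (some row) (some col) := rfl
    rw [hgo, h]
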